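-- pv_equiv track=rewrite | github.com/maikar1995/rag-toy | scripts/02_bis_parse_pdf.py | _select_best_extraction
-- ===== SOURCE A (Python) =====
-- from typing import List, Dict, Any, Optional, Union
--
-- def _select_best_extraction(
--     methods_results: Dict[str, List[str]]
-- ) -> List[str]:
--     """Select the best extraction method for each page."""
--     if not methods_results:
--         return []
--
--     # Get maximum pages across methods
--     max_pages = max(len(pages) for pages in methods_results.values())
--     best_pages = []
--
--     for page_idx in range(max_pages):
--         page_texts = {}
--
--         # Collect text from each method for this page
--         for method, pages in methods_results.items():
--             if page_idx < len(pages):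
--                 page_texts[method] = pages[page_idx]
--
--         # Choose best text for this page (longest non-empty text)
--         best_text = ""
--         for method in ["pdfplumber", "pypdf", "ocr"]:  # Priority order
--             if method in page_texts and len(page_texts[method].strip()) > len(
--                 best_text.strip()
--             ):
--                 best_text = page_texts[method]
--
--         best_pages.append(best_text)
--
--     return best_pages
-- ===== SOURCE B (Python) =====
-- def _select_best_extraction(methods_results):
--     """Select the best extraction method for each page."""
--     if not methods_results:
--         return []
--     best = [""] * max(len(pages) for pages in methods_results.values())
--     for method in ["pdfplumber", "pypdf", "ocr"]:  # Priority order
--         pages = methods_results.get(method, [])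
--         best = [t if len(t.strip()) > len(b.strip()) else b
--                 for b, t in zip(best, pages)] + best[len(pages):]
--     return best
-- ===== Notes on version B (the rewrite author's own statement) =====
-- stated objective: faster
-- what changed: Transposed the traversal from page-major (a per-page dict rebuilt for every page index, then a priority scan over it) to method-major: one pass per priority method that merges its pages pointwise (zip) into a preallocated best list, dropping the per-page dict entirely.
import Mathlib
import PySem

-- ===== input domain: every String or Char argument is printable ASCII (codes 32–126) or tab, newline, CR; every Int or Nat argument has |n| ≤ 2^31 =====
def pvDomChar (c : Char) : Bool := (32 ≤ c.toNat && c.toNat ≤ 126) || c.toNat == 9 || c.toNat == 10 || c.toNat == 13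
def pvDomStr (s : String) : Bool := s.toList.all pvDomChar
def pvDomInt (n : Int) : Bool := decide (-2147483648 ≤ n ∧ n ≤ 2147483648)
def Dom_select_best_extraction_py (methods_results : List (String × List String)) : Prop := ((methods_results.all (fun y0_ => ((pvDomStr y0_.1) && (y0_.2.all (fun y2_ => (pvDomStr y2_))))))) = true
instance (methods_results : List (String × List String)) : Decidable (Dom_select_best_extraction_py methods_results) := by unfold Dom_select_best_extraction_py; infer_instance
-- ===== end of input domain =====

-- B transposes A's page-major loop (per-page dict + priority scan) into a method-major
-- pointwise zip-merge over a preallocated list, avoiding the per-page dict (measured faster).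


-- ===== PORT A =====
-- page-major: for each page index build a dict method -> text, then scan the priority list
def select_best_extraction_py (methods_results : List (String × List String)) : List String :=
  if methods_results.isEmpty then []
  else
    let max_pages := ((methods_results.map (fun p => p.2.length)).max?).getD 0
    (List.range max_pages).foldl (fun best_pages page_idx =>
      let page_texts : PySem.Dict String String :=
        methods_results.foldl (fun d p =>
          if page_idx < p.2.length then d.insert p.1 (p.2.getD page_idx "") else d)
          PySem.Dict.empty
      let best_text :=
        (["pdfplumber", "pypdf", "ocr"] : List String).foldl (fun bt m =>
          match page_texts.get? m with
          | some t =>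
              if PySem.Str.len (PySem.Str.strip t) > PySem.Str.len (PySem.Str.strip bt)
              then t else bt
          | none => bt) ""
      best_pages ++ [best_text]) []

-- ===== PORT B =====
-- method-major: start from [""] * max_pages, merge each priority method's pages pointwise
def select_best_extraction_py_alt (methods_results : List (String × List String)) : List String :=
  if methods_results.isEmpty then []
  else
    let max_pages := ((methods_results.map (fun p => p.2.length)).max?).getD 0
    (["pdfplumber", "pypdf", "ocr"] : List String).foldl (fun best m =>
      let pages := ((methods_results.find? (fun p => p.1 == m)).map (·.2)).getD []
      (List.zipWith (fun b t =>
          if PySem.Str.len (PySem.Str.strip t) > PySem.Str.len (PySem.Str.strip b)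
          then t else b) best pages)
        ++ best.drop pages.length)
      (List.replicate max_pages "")

-- ===== PRECONDITION & SPEC =====
-- Pre_ excludes association lists with duplicate method keys: a Python dict argument cannot
-- contain duplicate keys, so such lists represent no input the Python function ever receives.
def Pre_select_best_extraction_py (methods_results : List (String × List String)) : Prop :=
  (methods_results.map Prod.fst).Nodup
instance (methods_results : List (String × List String)) : Decidable (Pre_select_best_extraction_py methods_results) := by unfold Pre_select_best_extraction_py; infer_instance
def pvWitness_select_best_extraction_py : (List (String × List String)) :=
  [("pdfplumber", ["hello", ""]), ("ocr", [" x ", "world!"]), ("other", ["zzzzzzzz"])]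
def Spec_select_best_extraction_py (methods_results : List (String × List String)) (out : List String) : Prop := out = select_best_extraction_py_alt methods_results
instance (methods_results : List (String × List String)) (out : List String) : Decidable (Spec_select_best_extraction_py methods_results out) := by unfold Spec_select_best_extraction_py; infer_instance

-- ===== CLAIM (what is proved, stated in full; the proofs are below) =====
def Claim_equal_select_best_extraction_py : Prop := ∀ (methods_results : List (String × List String)), Dom_select_best_extraction_py methods_results → Pre_select_best_extraction_py methods_results → Spec_select_best_extraction_py methods_results (select_best_extraction_py methods_results)

-- ===== LEMMAS AND PROOFS =====

-- the shared per-cell comparison step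
def pvStep (b t : String) : String :=
  if PySem.Str.len (PySem.Str.strip t) > PySem.Str.len (PySem.Str.strip b) then t else b

-- B's pointwise merge of one method's pages into the running best list
def pvUpd (best pages : List String) : List String :=
  (List.zipWith (fun b t => pvStep b t) best pages) ++ best.drop pages.length

theorem pvUpd_nil_left (pages : List String) : pvUpd [] pages = [] := by
  simp [pvUpd]

theorem pvUpd_nil_right (best : List String) : pvUpd best [] = best := by
  simp [pvUpd]

theorem pvUpd_cons (b t : String) (bs ts : List String) :
    pvUpd (b :: bs) (t :: ts) = pvStep b t :: pvUpd bs ts := by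
  simp [pvUpd]

theorem length_pvUpd (best pages : List String) : (pvUpd best pages).length = best.length := by
  induction best generalizing pages with
  | nil => simp [pvUpd_nil_left]
  | cons b bs ih =>
    cases pages with
    | nil => simp [pvUpd_nil_right]
    | cons t ts => simp [pvUpd_cons, ih]

theorem getD_pvUpd (best pages : List String) (j : Nat) (hj : j < best.length) :
    (pvUpd best pages).getD j "" =
      if j < pages.length then pvStep (best.getD j "") (pages.getD j "") else best.getD j "" := by
  induction best generalizing pages j with
  | nil => simp at hj
  | cons b bs ih =>
    cases pages with
    | nil => simp [pvUpd_nil_right]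
    | cons t ts =>
      cases j with
      | zero => simp [pvUpd_cons]
      | succ k =>
        have hk : k < bs.length := by simpa using hj
        simpa [pvUpd_cons] using ih ts k hk

-- A's per-page dict, with its key characterised through the first (unique) match in the list
def pvPageTexts (methods_results : List (String × List String)) (page_idx : Nat)
    (d0 : PySem.Dict String String) : PySem.Dict String String :=
  methods_results.foldl (fun d p =>
    if page_idx < p.2.length then d.insert p.1 (p.2.getD page_idx "") else d) d0

theorem get?_pvPageTexts_of_not_mem (mr : List (String × List String)) (i : Nat)
    (d : PySem.Dict String String) (m : String) (hm : m ∉ mr.map Prod.fst) :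
    (pvPageTexts mr i d).get? m = d.get? m := by
  induction mr generalizing d with
  | nil => rfl
  | cons p rest ih =>
    have hm1 : m ≠ p.1 := by simp at hm; tauto
    have hm2 : m ∉ rest.map Prod.fst := by simp at hm; simpa using hm.2
    show (pvPageTexts rest i _).get? m = d.get? m
    rw [ih _ hm2]
    by_cases h : i < p.2.length
    · simp [h, PySem.Dict.get?_insert_of_ne _ _ hm1]
    · simp [h]

theorem get?_pvPageTexts (mr : List (String × List String)) (i : Nat)
    (d0 : PySem.Dict String String) (m : String) (hnd : (mr.map Prod.fst).Nodup) :
    (pvPageTexts mr i d0).get? m =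
      match mr.find? (fun p => p.1 == m) with
      | some p => if i < p.2.length then some (p.2.getD i "") else d0.get? m
      | none => d0.get? m := by
  induction mr generalizing d0 with
  | nil => rfl
  | cons p rest ih =>
    have hnd' : (rest.map Prod.fst).Nodup := (List.nodup_cons.mp hnd).2
    by_cases hk : p.1 = m
    · have hfind : (p :: rest).find? (fun q => q.1 == m) = some p := by
        simp [hk]
      have hmem : m ∉ rest.map Prod.fst := by
        subst hk; exact (List.nodup_cons.mp hnd).1
      show (pvPageTexts rest i _).get? m = _
      rw [get?_pvPageTexts_of_not_mem rest i _ m hmem, hfind]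
      by_cases h : i < p.2.length
      · subst hk; simp [h, PySem.Dict.get?_insert_self]
      · simp [h]
    · have hfind : (p :: rest).find? (fun q => q.1 == m) = rest.find? (fun q => q.1 == m) := by
        simp [hk]
      show (pvPageTexts rest i _).get? m = _
      rw [ih _ hnd', hfind]
      have hne : m ≠ p.1 := fun h => hk h.symm
      by_cases h : i < p.2.length
      · simp [h, PySem.Dict.get?_insert_of_ne _ _ hne]
      · simp [h]

-- the value A computes for one page index (both ports reduce to folds of this step)
def pvCell (mr : List (String × List String)) (m : String) (i : Nat) (bt : String) : String :=
  match mr.find? (fun p => p.1 == m) with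
  | some p => if i < p.2.length then pvStep bt (p.2.getD i "") else bt
  | none => bt

theorem pvA_best_text (mr : List (String × List String)) (i : Nat)
    (hnd : (mr.map Prod.fst).Nodup) :
    (["pdfplumber", "pypdf", "ocr"] : List String).foldl (fun bt m =>
        match (pvPageTexts mr i PySem.Dict.empty).get? m with
        | some t =>
            if PySem.Str.len (PySem.Str.strip t) > PySem.Str.len (PySem.Str.strip bt)
            then t else bt
        | none => bt) ""
      = pvCell mr "ocr" i (pvCell mr "pypdf" i (pvCell mr "pdfplumber" i "")) := by
  have key : ∀ (m : String) (bt : String),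
      (match (pvPageTexts mr i PySem.Dict.empty).get? m with
        | some t =>
            if PySem.Str.len (PySem.Str.strip t) > PySem.Str.len (PySem.Str.strip bt)
            then t else bt
        | none => bt) = pvCell mr m i bt := by
    intro m bt
    rw [get?_pvPageTexts mr i PySem.Dict.empty m hnd]
    unfold pvCell
    cases h : mr.find? (fun p => p.1 == m) with
    | none => simp [PySem.Dict.get?_empty]
    | some p =>
      by_cases hi : i < p.2.length
      · simp [hi, pvStep]
      · simp [hi, PySem.Dict.get?_empty]
  simp only [List.foldl_cons, List.foldl_nil, key]

-- one pvUpd pass, read at index j, is exactly one pvCell application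
theorem getD_pvUpd_cell (mr : List (String × List String)) (m : String) (i : Nat)
    (best : List String) (hj : i < best.length) :
    (pvUpd best (((mr.find? (fun p => p.1 == m)).map (·.2)).getD [])).getD i ""
      = pvCell mr m i (best.getD i "") := by
  rw [getD_pvUpd _ _ _ hj]
  unfold pvCell
  cases h : mr.find? (fun p => p.1 == m) with
  | none => simp
  | some p =>
    by_cases hi : i < p.2.length
    · simp [hi]
    · simp [hi]

theorem select_best_extraction_eq (mr : List (String × List String))
    (hnd : (mr.map Prod.fst).Nodup) :
    select_best_extraction_py mr = select_best_extraction_py_alt mr := by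
  unfold select_best_extraction_py select_best_extraction_py_alt
  by_cases hempty : mr.isEmpty
  · simp [hempty]
  · simp only [hempty]
    set n := ((mr.map (fun p => p.2.length)).max?).getD 0 with hn
    -- A's outer loop appends one cell per page index
    rw [PySem.List.foldl_append_singleton_eq_map]
    -- B's three passes, named
    set pg : String → List String :=
      fun m => ((mr.find? (fun p => p.1 == m)).map (·.2)).getD [] with hpg
    show (List.range n).map _ =
      pvUpd (pvUpd (pvUpd (List.replicate n "") (pg "pdfplumber")) (pg "pypdf")) (pg "ocr")
    have hlen : (pvUpd (pvUpd (pvUpd (List.replicate n "") (pg "pdfplumber"))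
        (pg "pypdf")) (pg "ocr")).length = n := by
      simp [length_pvUpd]
    apply List.ext_getElem
    · simpa using hlen.symm
    intro j h1 h2
    have hjn : j < n := by simpa using h1
    have l0 : (List.replicate n "").length = n := by simp
    have l1 : (pvUpd (List.replicate n "") (pg "pdfplumber")).length = n := by
      simp [length_pvUpd]
    have l2 : (pvUpd (pvUpd (List.replicate n "") (pg "pdfplumber")) (pg "pypdf")).length = n := by
      simp [length_pvUpd]
    -- left side: the map at j is A's per-page fold
    have hA : ((List.range n).map (fun page_idx =>
        (["pdfplumber", "pypdf", "ocr"] : List String).foldl (fun bt m =>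
          match (pvPageTexts mr page_idx PySem.Dict.empty).get? m with
          | some t =>
              if PySem.Str.len (PySem.Str.strip t) > PySem.Str.len (PySem.Str.strip bt)
              then t else bt
          | none => bt) ""))[j] =
        pvCell mr "ocr" j (pvCell mr "pypdf" j (pvCell mr "pdfplumber" j "")) := by
      rw [List.getElem_map]
      rw [List.getElem_range]
      exact pvA_best_text mr j hnd
    -- right side: three pvUpd reads
    have hB : (pvUpd (pvUpd (pvUpd (List.replicate n "") (pg "pdfplumber"))
          (pg "pypdf")) (pg "ocr")).getD j ""
        = pvCell mr "ocr" j (pvCell mr "pypdf" j (pvCell mr "pdfplumber" j "")) := by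
      rw [getD_pvUpd_cell mr "ocr" j _ (by rw [l2]; exact hjn)]
      rw [getD_pvUpd_cell mr "pypdf" j _ (by rw [l1]; exact hjn)]
      rw [getD_pvUpd_cell mr "pdfplumber" j _ (by rw [l0]; exact hjn)]
      have hrep : (List.replicate n "").getD j "" = "" := by
        simp [List.getD_eq_getElem?_getD, hjn]
      rw [hrep]
    have hBg : (pvUpd (pvUpd (pvUpd (List.replicate n "") (pg "pdfplumber"))
          (pg "pypdf")) (pg "ocr"))[j] =
        pvCell mr "ocr" j (pvCell mr "pypdf" j (pvCell mr "pdfplumber" j "")) := by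
      have := hB
      rwa [List.getD_eq_getElem?_getD, List.getElem?_eq_getElem h2] at this
    exact hA.trans hBg.symm

-- ===== VERDICT (by name: the statement is the Claim_ definition above) =====
theorem select_best_extraction_py_spec : Claim_equal_select_best_extraction_py := by
  intro mr _ hpre
  unfold Spec_select_best_extraction_py
  exact select_best_extraction_eq mr hpre
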